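-- pv_equiv track=rewrite | github.com/phiber1/proj-chess | tools/pgn_to_book.py | can_piece_reach
-- ===== SOURCE A (Python) =====
-- def can_piece_reach(piece, from_sq, to_sq, board):
--     """Check if piece can reach target square (basic validation)."""
--     from_file = from_sq % 16
--     from_rank = from_sq // 16
--     to_file = to_sq % 16
--     to_rank = to_sq // 16
--
--     df = to_file - from_file
--     dr = to_rank - from_rank
--
--     if piece == 'N':
--         # Knight: L-shape
--         return (abs(df), abs(dr)) in [(1, 2), (2, 1)]
--
--     elif piece == 'B':
--         # Bishop: diagonal
--         if abs(df) != abs(dr) or df == 0: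
--             return False
--         # Check path is clear
--         step_f = 1 if df > 0 else -1
--         step_r = 1 if dr > 0 else -1
--         f, r = from_file + step_f, from_rank + step_r
--         while (f, r) != (to_file, to_rank):
--             sq = r * 16 + f
--             if sq in board:
--                 return False
--             f += step_f
--             r += step_r
--         return True
--
--     elif piece == 'R':
--         # Rook: straight lines
--         if df != 0 and dr != 0:
--             return False
--         # Check path is clear
--         if df != 0:
--             step = 1 if df > 0 else -1
--             for f in range(from_file + step, to_file, step):
--                 if from_rank * 16 + f in board:
--                     return False
--         else:
--             step = 1 if dr > 0 else -1
--             for r in range(from_rank + step, to_rank, step):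
--                 if r * 16 + from_file in board:
--                     return False
--         return True
--
--     elif piece == 'Q':
--         # Queen: diagonal or straight
--         if df == 0 or dr == 0:
--             return can_piece_reach('R', from_sq, to_sq, board)
--         elif abs(df) == abs(dr):
--             return can_piece_reach('B', from_sq, to_sq, board)
--         return False
--
--     elif piece == 'K':
--         # King: one square any direction
--         return abs(df) <= 1 and abs(dr) <= 1 and (df != 0 or dr != 0)
--
--     return False
-- ===== SOURCE B (Python) =====
-- def can_piece_reach(piece, from_sq, to_sq, board):
--     """Check if piece can reach target square (basic validation)."""
--     ff, fr = from_sq % 16, from_sq // 16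
--     tf, tr = to_sq % 16, to_sq // 16
--     df, dr = tf - ff, tr - fr
--
--     if piece == 'N':
--         return abs(df) * abs(dr) == 2
--     if piece == 'K':
--         return max(abs(df), abs(dr)) == 1
--
--     # sliders: geometry check
--     if piece == 'B':
--         if abs(df) != abs(dr) or df == 0:
--             return False
--     elif piece == 'R':
--         if df != 0 and dr != 0:
--             return False
--     elif piece == 'Q':
--         if df != 0 and dr != 0 and abs(df) != abs(dr):
--             return False
--     else:
--         return False
--
--     # no path walk: a square b blocks iff b = from_sq + k*step for some 1 <= k < n,
--     # i.e. (b - from_sq) is an exact multiple of step with quotient in [1, n)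
--     n = max(abs(df), abs(dr))
--     if n <= 1:
--         return True
--     step = 16 * ((dr > 0) - (dr < 0)) + ((df > 0) - (df < 0))
--     return not any((b - from_sq) % step == 0 and 1 <= (b - from_sq) // step < n
--                    for b in board)
-- ===== Notes on version B (the rewrite author's own statement) =====
-- stated objective: alternative
-- what changed: A walks the path square by square (bishop while-loop, two rook range loops, queen recursing into R/B) testing board membership at each step; B never walks a path: it scans the board once and classifies each occupied square arithmetically as blocking iff (b - from_sq) is an exact multiple of the line step with quotient in [1, n), plus closed predicates for knight (|df|*|dr|==2) and king (max==1).
import Mathlib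
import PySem

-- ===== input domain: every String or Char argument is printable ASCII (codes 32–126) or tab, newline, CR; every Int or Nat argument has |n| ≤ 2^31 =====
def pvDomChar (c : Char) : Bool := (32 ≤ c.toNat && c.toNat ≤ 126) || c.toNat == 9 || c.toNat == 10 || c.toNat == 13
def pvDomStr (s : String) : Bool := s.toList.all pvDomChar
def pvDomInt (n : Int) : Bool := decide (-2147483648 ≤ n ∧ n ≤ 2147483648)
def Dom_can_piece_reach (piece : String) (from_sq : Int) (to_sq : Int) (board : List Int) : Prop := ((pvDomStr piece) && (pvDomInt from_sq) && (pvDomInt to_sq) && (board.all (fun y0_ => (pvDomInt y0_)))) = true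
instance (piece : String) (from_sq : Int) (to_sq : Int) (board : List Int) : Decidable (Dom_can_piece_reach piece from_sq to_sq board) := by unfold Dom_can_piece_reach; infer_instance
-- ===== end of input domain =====

-- B drops A's per-square path walks entirely: it scans the BOARD once and decides by a
-- divisibility test whether an occupied square lies strictly between the endpoints
-- (b = from_sq + k*step for some 1 ≤ k < n); objective: alternative algorithm.

-- ===== PORT A =====
-- A's bishop 'while (f, r) != (to_file, to_rank)' loop, with a fuel bound: under the
-- diagonal guard (|df| = |dr|, df ≠ 0) the loop exits by the equality test after
-- |df| - 1 iterations, so fuel = |df| is never exhausted (the 0-case is unreachable).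
def pvWalkA (board : List Int) (to_f : Int) (to_r : Int) (sf : Int) (sr : Int) : Nat → Int → Int → Bool
  | 0, _, _ => true
  | fuel + 1, f, r =>
    if f = to_f ∧ r = to_r then true
    else if board.contains (r * 16 + f) then false
    else pvWalkA board to_f to_r sf sr fuel (f + sf) (r + sr)

-- the 'R' branch of A (A's recursive call can_piece_reach('R', from_sq, to_sq, board)
-- recomputes exactly these four values from the same squares, so it is this helper)
def pvRookA (from_file : Int) (from_rank : Int) (to_file : Int) (to_rank : Int) (board : List Int) : Bool :=
  let df := to_file - from_file
  let dr := to_rank - from_rank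
  if df ≠ 0 ∧ dr ≠ 0 then false
  else if df ≠ 0 then
    let step : Int := if df > 0 then 1 else -1
    (PySem.List.pyRange (from_file + step) to_file step).all
      (fun f => !board.contains (from_rank * 16 + f))
  else
    let step : Int := if dr > 0 then 1 else -1
    (PySem.List.pyRange (from_rank + step) to_rank step).all
      (fun r => !board.contains (r * 16 + from_file))

-- the 'B' branch of A (same remark for can_piece_reach('B', ...))
def pvBishopA (from_file : Int) (from_rank : Int) (to_file : Int) (to_rank : Int) (board : List Int) : Bool :=
  let df := to_file - from_file
  let dr := to_rank - from_rank
  if df.natAbs ≠ dr.natAbs ∨ df = 0 then false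
  else
    let step_f : Int := if df > 0 then 1 else -1
    let step_r : Int := if dr > 0 then 1 else -1
    pvWalkA board to_file to_rank step_f step_r df.natAbs (from_file + step_f) (from_rank + step_r)

def can_piece_reach (piece : String) (from_sq : Int) (to_sq : Int) (board : List Int) : Bool :=
  let from_file := PySem.Int.mod from_sq 16
  let from_rank := PySem.Int.floordiv from_sq 16
  let to_file := PySem.Int.mod to_sq 16
  let to_rank := PySem.Int.floordiv to_sq 16
  let df := to_file - from_file
  let dr := to_rank - from_rank
  if piece = "N" then
    -- (abs(df), abs(dr)) in [(1, 2), (2, 1)]  (abs of an int = natAbs, exact)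
    decide ((df.natAbs, dr.natAbs) = (1, 2) ∨ (df.natAbs, dr.natAbs) = (2, 1))
  else if piece = "B" then
    pvBishopA from_file from_rank to_file to_rank board
  else if piece = "R" then
    pvRookA from_file from_rank to_file to_rank board
  else if piece = "Q" then
    if df = 0 ∨ dr = 0 then pvRookA from_file from_rank to_file to_rank board
    else if df.natAbs = dr.natAbs then pvBishopA from_file from_rank to_file to_rank board
    else false
  else if piece = "K" then
    decide (df.natAbs ≤ 1 ∧ dr.natAbs ≤ 1 ∧ (df ≠ 0 ∨ dr ≠ 0))
  else false

-- ===== PORT B =====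
-- (x > 0) - (x < 0)
def pvSign (x : Int) : Int := (if x > 0 then 1 else 0) - (if x < 0 then 1 else 0)

-- '(b - from_sq) % step == 0 and 1 <= (b - from_sq) // step < n' for one board element b
def pvBlockedBy (from_sq : Int) (step : Int) (n : Int) (b : Int) : Bool :=
  PySem.Int.mod (b - from_sq) step == 0 &&
    decide (1 ≤ PySem.Int.floordiv (b - from_sq) step ∧ PySem.Int.floordiv (b - from_sq) step < n)

-- B's arithmetic clearance test: scan the board, no path walk
def pvSliderClear (from_sq : Int) (df : Int) (dr : Int) (board : List Int) : Bool :=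
  let n : Int := (max df.natAbs dr.natAbs : Nat)
  if n ≤ 1 then true
  else
    let step := 16 * pvSign dr + pvSign df
    !(board.any (pvBlockedBy from_sq step n))

def can_piece_reach_alt (piece : String) (from_sq : Int) (to_sq : Int) (board : List Int) : Bool :=
  let ff := PySem.Int.mod from_sq 16
  let fr := PySem.Int.floordiv from_sq 16
  let tf := PySem.Int.mod to_sq 16
  let tr := PySem.Int.floordiv to_sq 16
  let df := tf - ff
  let dr := tr - fr
  if piece = "N" then decide (df.natAbs * dr.natAbs = 2)
  else if piece = "K" then decide (max df.natAbs dr.natAbs = 1)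
  else if piece = "B" then
    if df.natAbs ≠ dr.natAbs ∨ df = 0 then false else pvSliderClear from_sq df dr board
  else if piece = "R" then
    if df ≠ 0 ∧ dr ≠ 0 then false else pvSliderClear from_sq df dr board
  else if piece = "Q" then
    if df ≠ 0 ∧ dr ≠ 0 ∧ df.natAbs ≠ dr.natAbs then false
    else pvSliderClear from_sq df dr board
  else false

-- ===== PRECONDITION & SPEC =====
def Spec_can_piece_reach (piece : String) (from_sq : Int) (to_sq : Int) (board : List Int) (out : Bool) : Prop := out = can_piece_reach_alt piece from_sq to_sq board
instance (piece : String) (from_sq : Int) (to_sq : Int) (board : List Int) (out : Bool) : Decidable (Spec_can_piece_reach piece from_sq to_sq board out) := by unfold Spec_can_piece_reach; infer_instance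

-- ===== CLAIM (what is proved, stated in full; the proofs are below) =====
def Claim_equal_can_piece_reach : Prop := ∀ (piece : String) (from_sq : Int) (to_sq : Int) (board : List Int), Dom_can_piece_reach piece from_sq to_sq board → Spec_can_piece_reach piece from_sq to_sq board (can_piece_reach piece from_sq to_sq board)

-- ===== LEMMAS AND PROOFS =====

-- proof-side intermediate form: the sign-stepped scan of the k-th path square
def pvClearPath (ff : Int) (fr : Int) (df : Int) (dr : Int) (board : List Int) : Bool :=
  let sf := pvSign df
  let sr := pvSign dr
  let n : Int := (max df.natAbs dr.natAbs : Nat)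
  (PySem.List.pyRange 1 n 1).all
    (fun k => !board.contains ((fr + k * sr) * 16 + (ff + k * sf)))

theorem pvSign_pos {x : Int} (h : 0 < x) : pvSign x = 1 := by
  unfold pvSign
  rw [if_pos h, if_neg (show ¬ x < 0 by omega)]
  norm_num

theorem pvSign_neg {x : Int} (h : x < 0) : pvSign x = -1 := by
  unfold pvSign
  rw [if_neg (show ¬ x > 0 by omega), if_pos h]
  norm_num

theorem pvSign_eq_zero {x : Int} (h : x = 0) : pvSign x = 0 := by
  subst h
  rfl

-- A's bishop walk, started j steps (sf, sr) away from the target with enough fuel,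
-- checks exactly the j intermediate squares.
theorem pvWalkA_spec (board : List Int) (sf sr : Int)
    (hsf : sf = 1 ∨ sf = -1) (hsr : sr = 1 ∨ sr = -1) :
    ∀ (j fuel : Nat) (f r : Int), j ≤ fuel →
      pvWalkA board (f + (j : Int) * sf) (r + (j : Int) * sr) sf sr fuel f r
        = (List.range j).all
            (fun k => !board.contains ((r + (k : Int) * sr) * 16 + (f + (k : Int) * sf))) := by
  intro j
  induction j with
  | zero =>
    intro fuel f r _
    cases fuel with
    | zero => simp [pvWalkA]
    | succ fuel => simp [pvWalkA]
  | succ j ih =>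
    intro fuel f r hle
    cases fuel with
    | zero => omega
    | succ fuel =>
      have hne : ¬((f : Int) = f + ((j + 1 : Nat) : Int) * sf ∧ (r : Int) = r + ((j + 1 : Nat) : Int) * sr) := by
        rcases hsf with rfl | rfl <;> push_cast <;> intro h <;> omega
      rw [List.range_succ_eq_map]
      simp only [pvWalkA, if_neg hne, List.all_cons, List.all_map]
      by_cases hcon : board.contains (r * 16 + f) = true
      · rw [if_pos hcon]
        simp only [Nat.cast_zero, zero_mul, add_zero, hcon, Bool.not_true, Bool.false_and]
      · rw [if_neg hcon]
        have hcon' : board.contains (r * 16 + f) = false := by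
          exact Bool.eq_false_iff.mpr hcon
        have htgt_f : f + ((j + 1 : Nat) : Int) * sf = (f + sf) + (j : Int) * sf := by push_cast; ring
        have htgt_r : r + ((j + 1 : Nat) : Int) * sr = (r + sr) + (j : Int) * sr := by push_cast; ring
        rw [htgt_f, htgt_r, ih fuel (f + sf) (r + sr) (by omega)]
        simp only [Nat.cast_zero, zero_mul, add_zero, hcon', Bool.not_false, Bool.true_and]
        refine List.all_congr rfl (fun k => ?_)
        simp only [Function.comp]
        have h1 : r + sr + (k : Int) * sr = r + ((k + 1 : Nat) : Int) * sr := by push_cast; ring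
        have h2 : f + sf + (k : Int) * sf = f + ((k + 1 : Nat) : Int) * sf := by push_cast; ring
        rw [h1, h2]

-- the sign-stepped scan as an all over List.range
theorem pvClearPath_eq (ff fr df dr : Int) (board : List Int) :
    pvClearPath ff fr df dr board
      = (List.range (max df.natAbs dr.natAbs - 1)).all
          (fun k => !board.contains ((fr + (1 + (k : Int)) * pvSign dr) * 16 + (ff + (1 + (k : Int)) * pvSign df))) := by
  simp only [pvClearPath]
  rw [PySem.List.pyRange_one]
  have hn : (((max df.natAbs dr.natAbs : Nat) : Int) - 1).toNat = max df.natAbs dr.natAbs - 1 := by omega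
  rw [hn, List.all_map]
  exact List.all_congr rfl (fun k => rfl)

-- A's bishop walk over the full diagonal = the indexed clearance scan
theorem pvWalk_case (board : List Int) (ff fr tf tr sf sr : Int) (m : Nat) (hm : 1 ≤ m)
    (hsf : sf = 1 ∨ sf = -1) (hsr : sr = 1 ∨ sr = -1)
    (e1 : tf = ff + sf + ((m - 1 : Nat) : Int) * sf) (e2 : tr = fr + sr + ((m - 1 : Nat) : Int) * sr) :
    pvWalkA board tf tr sf sr m (ff + sf) (fr + sr)
      = (List.range (m - 1)).all
          (fun k => !board.contains ((fr + (1 + (k : Int)) * sr) * 16 + (ff + (1 + (k : Int)) * sf))) := by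
  rw [e1, e2, pvWalkA_spec board sf sr hsf hsr (m - 1) m (ff + sf) (fr + sr) (by omega)]
  refine List.all_congr rfl (fun k => ?_)
  have h1 : fr + sr + (k : Int) * sr = fr + (1 + (k : Int)) * sr := by ring
  have h2 : ff + sf + (k : Int) * sf = ff + (1 + (k : Int)) * sf := by ring
  rw [h1, h2]

-- rook branch of A = the sign-stepped scan, given the rook geometry
theorem pvRookA_eq_clear (ff fr tf tr : Int) (board : List Int)
    (h : tf - ff = 0 ∨ tr - fr = 0) :
    pvRookA ff fr tf tr board = pvClearPath ff fr (tf - ff) (tr - fr) board := by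
  rw [pvClearPath_eq]
  simp only [pvRookA]
  by_cases hdf : tf - ff = 0
  · rw [if_neg (by tauto : ¬(tf - ff ≠ 0 ∧ tr - fr ≠ 0)), if_neg (by omega : ¬ tf - ff ≠ 0)]
    simp only [pvSign_eq_zero hdf]
    by_cases hdr : tr - fr = 0
    · rw [if_neg (by omega : ¬ tr - fr > 0), pvSign_eq_zero hdr,
        PySem.List.pyRange_neg_one_eq_nil (by omega : fr + -1 ≤ tr),
        show max (tf - ff).natAbs (tr - fr).natAbs - 1 = 0 by omega]
      simp
    · by_cases hpos : tr - fr > 0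
      · rw [if_pos hpos, PySem.List.pyRange_one, List.all_map,
          show (tr - (fr + 1)).toNat = max (tf - ff).natAbs (tr - fr).natAbs - 1 by omega]
        simp only [pvSign_pos hpos]
        refine List.all_congr rfl (fun k => ?_)
        simp only [Function.comp]
        rw [show fr + 1 + (k : Int) = fr + (1 + (k : Int)) * 1 by ring,
          show ff = ff + (1 + (k : Int)) * 0 by ring]
        rw [show ff + (1 + (k : Int)) * 0 + (1 + (k : Int)) * 0 = ff + (1 + (k : Int)) * 0 by ring]
      · rw [if_neg hpos, PySem.List.pyRange_neg_one, List.all_map,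
          show (fr + -1 - tr).toNat = max (tf - ff).natAbs (tr - fr).natAbs - 1 by omega]
        simp only [pvSign_neg (by omega : tr - fr < 0)]
        refine List.all_congr rfl (fun k => ?_)
        simp only [Function.comp]
        rw [show fr + -1 - (k : Int) = fr + (1 + (k : Int)) * (-1) by ring,
          show ff = ff + (1 + (k : Int)) * 0 by ring]
        rw [show ff + (1 + (k : Int)) * 0 + (1 + (k : Int)) * 0 = ff + (1 + (k : Int)) * 0 by ring]
  · have hdr : tr - fr = 0 := by tauto
    rw [if_neg (by tauto : ¬(tf - ff ≠ 0 ∧ tr - fr ≠ 0)), if_pos (by omega : tf - ff ≠ 0)]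
    simp only [pvSign_eq_zero hdr]
    by_cases hpos : tf - ff > 0
    · rw [if_pos hpos, PySem.List.pyRange_one, List.all_map,
        show (tf - (ff + 1)).toNat = max (tf - ff).natAbs (tr - fr).natAbs - 1 by omega]
      simp only [pvSign_pos hpos]
      refine List.all_congr rfl (fun k => ?_)
      simp only [Function.comp]
      rw [show ff + 1 + (k : Int) = ff + (1 + (k : Int)) * 1 by ring,
        show fr = fr + (1 + (k : Int)) * 0 by ring]
      rw [show (fr + (1 + (k : Int)) * 0 + (1 + (k : Int)) * 0) = fr + (1 + (k : Int)) * 0 by ring]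
    · rw [if_neg hpos, PySem.List.pyRange_neg_one, List.all_map,
        show (ff + -1 - tf).toNat = max (tf - ff).natAbs (tr - fr).natAbs - 1 by omega]
      simp only [pvSign_neg (by omega : tf - ff < 0)]
      refine List.all_congr rfl (fun k => ?_)
      simp only [Function.comp]
      rw [show ff + -1 - (k : Int) = ff + (1 + (k : Int)) * (-1) by ring,
        show fr = fr + (1 + (k : Int)) * 0 by ring]
      rw [show (fr + (1 + (k : Int)) * 0 + (1 + (k : Int)) * 0) = fr + (1 + (k : Int)) * 0 by ring]

-- bishop branch of A = the sign-stepped scan, given the diagonal geometry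
theorem pvBishopA_eq_clear (ff fr tf tr : Int) (board : List Int)
    (h1 : (tf - ff).natAbs = (tr - fr).natAbs) (h2 : tf - ff ≠ 0) :
    pvBishopA ff fr tf tr board = pvClearPath ff fr (tf - ff) (tr - fr) board := by
  rw [pvClearPath_eq]
  simp only [pvBishopA, if_neg (by tauto : ¬((tf - ff).natAbs ≠ (tr - fr).natAbs ∨ tf - ff = 0))]
  have hdr : tr - fr ≠ 0 := by omega
  rw [show max (tf - ff).natAbs (tr - fr).natAbs = (tf - ff).natAbs by omega]
  by_cases hf : tf - ff > 0 <;> by_cases hr : tr - fr > 0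
  · simp only [if_pos hf, if_pos hr, pvSign_pos hf, pvSign_pos hr]
    exact pvWalk_case board ff fr tf tr 1 1 (tf - ff).natAbs (by omega) (Or.inl rfl) (Or.inl rfl)
      (by omega) (by omega)
  · simp only [if_pos hf, if_neg hr, pvSign_pos hf, pvSign_neg (by omega : tr - fr < 0)]
    exact pvWalk_case board ff fr tf tr 1 (-1) (tf - ff).natAbs (by omega) (Or.inl rfl) (Or.inr rfl)
      (by omega) (by omega)
  · simp only [if_neg hf, if_pos hr, pvSign_neg (by omega : tf - ff < 0), pvSign_pos hr]
    exact pvWalk_case board ff fr tf tr (-1) 1 (tf - ff).natAbs (by omega) (Or.inr rfl) (Or.inl rfl)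
      (by omega) (by omega)
  · simp only [if_neg hf, if_neg hr, pvSign_neg (by omega : tf - ff < 0), pvSign_neg (by omega : tr - fr < 0)]
    exact pvWalk_case board ff fr tf tr (-1) (-1) (tf - ff).natAbs (by omega) (Or.inr rfl) (Or.inr rfl)
      (by omega) (by omega)

-- B's board scan = the path scan, for step ≠ 0: b blocks iff b is from_sq + k*step, 1 ≤ k < n
theorem pvBlocked_eq_scan (from_sq step n : Int) (board : List Int) (hs : step ≠ 0) :
    (!(board.any (pvBlockedBy from_sq step n)))
      = (PySem.List.pyRange 1 n 1).all (fun k => !board.contains (from_sq + k * step)) := by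
  rw [Bool.eq_iff_iff]
  simp only [Bool.not_eq_true', List.any_eq_false, List.all_eq_true, Bool.not_eq_true',
    pvBlockedBy, Bool.and_eq_true, beq_iff_eq, decide_eq_true_eq,
    PySem.List.mem_pyRange_one, List.contains_eq_mem, decide_eq_false_iff_not]
  constructor
  · rintro H k ⟨hk1, hk2⟩ hmem
    have hmod : PySem.Int.mod (from_sq + k * step - from_sq) step = 0 := by
      rw [PySem.Int.mod_eq_zero_iff_dvd]; exact ⟨k, by ring⟩
    have hid := PySem.Int.floordiv_mul_add_mod (from_sq + k * step - from_sq) step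
    rw [hmod, add_zero] at hid
    have hq : PySem.Int.floordiv (from_sq + k * step - from_sq) step = k := by
      have : PySem.Int.floordiv (from_sq + k * step - from_sq) step * step = k * step := by
        rw [hid]; ring
      exact mul_right_cancel₀ hs this
    exact H _ hmem ⟨hmod, by rw [hq]; exact ⟨hk1, hk2⟩⟩
  · rintro H b hb ⟨hmod, hq1, hq2⟩
    have hid := PySem.Int.floordiv_mul_add_mod (b - from_sq) step
    rw [hmod, add_zero] at hid
    set q := PySem.Int.floordiv (b - from_sq) step with hqdef
    have hbeq : b = from_sq + q * step := by omega
    exact H q ⟨hq1, hq2⟩ (hbeq ▸ hb)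

theorem pvSign_cases (x : Int) : pvSign x = 1 ∨ pvSign x = 0 ∨ pvSign x = -1 := by
  unfold pvSign; split_ifs <;> norm_num

theorem pvSign_ne_zero {x : Int} (h : x ≠ 0) : pvSign x ≠ 0 := by
  unfold pvSign; split_ifs <;> omega

-- B's slider clearance = the sign-stepped scan (no geometry hypothesis needed)
theorem pvSliderClear_eq (from_sq ff fr df dr : Int) (board : List Int)
    (hid : fr * 16 + ff = from_sq) :
    pvSliderClear from_sq df dr board = pvClearPath ff fr df dr board := by
  simp only [pvSliderClear, pvClearPath]
  by_cases hn : ((max df.natAbs dr.natAbs : Nat) : Int) ≤ 1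
  · rw [if_pos hn, PySem.List.pyRange_one_eq_nil (by omega)]
    simp
  · rw [if_neg hn]
    have hne : df ≠ 0 ∨ dr ≠ 0 := by
      by_contra h
      push_neg at h
      rw [h.1, h.2] at hn
      simp at hn
    have hstep : 16 * pvSign dr + pvSign df ≠ 0 := by
      rcases hne with h | h
      · have := pvSign_ne_zero h
        rcases pvSign_cases df with h1 | h1 | h1 <;> rcases pvSign_cases dr with h2 | h2 | h2 <;> omega
      · have := pvSign_ne_zero h
        rcases pvSign_cases df with h1 | h1 | h1 <;> rcases pvSign_cases dr with h2 | h2 | h2 <;> omega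
    rw [pvBlocked_eq_scan from_sq (16 * pvSign dr + pvSign df) _ board hstep]
    refine List.all_congr rfl (fun k => ?_)
    have : (fr + k * pvSign dr) * 16 + (ff + k * pvSign df)
        = from_sq + k * (16 * pvSign dr + pvSign df) := by rw [← hid]; ring
    rw [this]

-- the whole dispatch
theorem can_piece_reach_eq (piece : String) (from_sq : Int) (to_sq : Int) (board : List Int) :
    can_piece_reach piece from_sq to_sq board = can_piece_reach_alt piece from_sq to_sq board := by
  unfold can_piece_reach can_piece_reach_alt
  set ff := PySem.Int.mod from_sq 16 with hff
  set fr := PySem.Int.floordiv from_sq 16 with hfr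
  set tf := PySem.Int.mod to_sq 16 with htf
  set tr := PySem.Int.floordiv to_sq 16 with htr
  have hid : fr * 16 + ff = from_sq := PySem.Int.floordiv_mul_add_mod from_sq 16
  by_cases hN : piece = "N"
  · simp only [if_pos hN, decide_eq_decide, Prod.mk.injEq]
    constructor
    · rintro (⟨h1, h2⟩ | ⟨h1, h2⟩) <;> rw [h1, h2]
    · intro h
      have hle : (tf - ff).natAbs ≤ 2 := Nat.le_of_dvd (by norm_num) ⟨(tr - fr).natAbs, h.symm⟩
      interval_cases hv : (tf - ff).natAbs <;> omega
  by_cases hK : piece = "K"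
  · simp only [if_neg hN, if_pos hK, if_neg (by simp [hK] : ¬ piece = "B"),
      if_neg (by simp [hK] : ¬ piece = "R"), if_neg (by simp [hK] : ¬ piece = "Q"),
      decide_eq_decide]
    omega
  by_cases hB : piece = "B"
  · simp only [if_neg hN, if_pos hB, if_neg (by simp [hB] : ¬ piece = "K")]
    by_cases hg : (tf - ff).natAbs ≠ (tr - fr).natAbs ∨ tf - ff = 0
    · rw [if_pos hg]
      simp only [pvBishopA, if_pos hg]
    · rw [if_neg hg]
      push_neg at hg
      rw [pvBishopA_eq_clear ff fr tf tr board hg.1 hg.2,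
        pvSliderClear_eq from_sq ff fr (tf - ff) (tr - fr) board hid]
  by_cases hR : piece = "R"
  · simp only [if_neg hN, if_neg hB, if_pos hR, if_neg (by simp [hR] : ¬ piece = "K")]
    by_cases hg : tf - ff ≠ 0 ∧ tr - fr ≠ 0
    · rw [if_pos hg]
      simp only [pvRookA, if_pos hg]
    · rw [if_neg hg]
      have hg' : tf - ff = 0 ∨ tr - fr = 0 := by tauto
      rw [pvRookA_eq_clear ff fr tf tr board hg',
        pvSliderClear_eq from_sq ff fr (tf - ff) (tr - fr) board hid]
  by_cases hQ : piece = "Q"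
  · simp only [if_neg hN, if_neg hB, if_neg hR, if_pos hQ, if_neg (by simp [hQ] : ¬ piece = "K")]
    by_cases hg1 : tf - ff = 0 ∨ tr - fr = 0
    · rw [if_pos hg1, if_neg (by tauto : ¬(tf - ff ≠ 0 ∧ tr - fr ≠ 0 ∧ (tf - ff).natAbs ≠ (tr - fr).natAbs)),
        pvRookA_eq_clear ff fr tf tr board hg1,
        pvSliderClear_eq from_sq ff fr (tf - ff) (tr - fr) board hid]
    · rw [if_neg hg1]
      by_cases hg2 : (tf - ff).natAbs = (tr - fr).natAbs
      · rw [if_pos hg2, if_neg (by tauto : ¬(tf - ff ≠ 0 ∧ tr - fr ≠ 0 ∧ (tf - ff).natAbs ≠ (tr - fr).natAbs)),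
          pvBishopA_eq_clear ff fr tf tr board hg2 (by tauto),
          pvSliderClear_eq from_sq ff fr (tf - ff) (tr - fr) board hid]
      · rw [if_neg hg2, if_pos (by tauto : tf - ff ≠ 0 ∧ tr - fr ≠ 0 ∧ (tf - ff).natAbs ≠ (tr - fr).natAbs)]
  · simp [hN, hB, hR, hQ, hK]

-- ===== VERDICT (by name: the statement is the Claim_ definition above) =====
theorem can_piece_reach_spec : Claim_equal_can_piece_reach := by
  intro piece from_sq to_sq board _
  unfold Spec_can_piece_reach
  exact can_piece_reach_eq piece from_sq to_sq board
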